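-- pv_equiv track=rewrite | github.com/nechama-sh-m/google-Project | init.py | fix_term
-- ===== SOURCE A (Python) =====
-- import string
--
-- def fix_term(term):
--     term = term.lower()
--     out = term.translate(str.maketrans('', '', string.punctuation))
--     i = 0
--     while i != len(out):
--         if out[i] == " ":
--             j = i
--             while j < len(out) and out[j] == " ":
--                 j += 1
--             out = out[:i + 1] + out[j:]
--         i += 1
--
--     return out
-- ===== SOURCE B (Python) =====
-- import string
--
-- def fix_term(term):
--     # single-pass state machine: skip punctuation, emit a space only when the
--     # previous emitted char was not a space, emit everything else as-is
--     res = []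
--     prev_space = False
--     for ch in term.lower():
--         if ch in string.punctuation:
--             continue
--         if ch == ' ':
--             if not prev_space:
--                 res.append(' ')
--             prev_space = True
--         else:
--             res.append(ch)
--             prev_space = False
--     return ''.join(res)
-- ===== Notes on version B (the rewrite author's own statement) =====
-- stated objective: simpler
-- what changed: A does a separate translate pass then an index-walk over the string with an inner forward scan and repeated slicing to delete space runs; B is one linear state-machine pass that skips punctuation and tracks whether the last emitted character was a space.
import Mathlib
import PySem

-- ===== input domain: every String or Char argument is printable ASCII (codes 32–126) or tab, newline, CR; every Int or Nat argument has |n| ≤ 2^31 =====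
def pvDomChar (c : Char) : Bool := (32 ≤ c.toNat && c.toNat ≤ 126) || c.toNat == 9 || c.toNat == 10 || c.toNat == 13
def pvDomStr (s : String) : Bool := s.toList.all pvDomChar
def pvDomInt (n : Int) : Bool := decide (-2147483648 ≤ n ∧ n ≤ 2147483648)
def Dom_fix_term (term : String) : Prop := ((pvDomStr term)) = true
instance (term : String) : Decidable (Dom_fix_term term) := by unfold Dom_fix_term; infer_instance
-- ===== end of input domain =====

-- B replaces A's translate pass + index-walk with inner scan and slicing by one
-- linear state-machine pass (objective: simpler).

-- ===== PORT A =====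
-- string.punctuation
def pvPunct : List Char := "!\"#$%&'()*+,-./:;<=>?@[\\]^_`{|}~".toList

-- inner `while j < len(out) and out[j] == " ": j += 1`; fuel is only a
-- totality guard (fuel ≥ len(out) - j at every call, so it never runs out)
def pvFindJ (out : List Char) (fuel j : Nat) : Nat :=
  match fuel with
  | 0 => j
  | fuel + 1 =>
    if j < out.length ∧ out.getD j ' ' = ' ' then pvFindJ out fuel (j + 1) else j

-- outer `while i != len(out)`; out[:i+1] + out[j:] is take/drop; fuel is only
-- a totality guard (len(out) - i strictly decreases each iteration)
def pvLoopA (out : List Char) (fuel i : Nat) : List Char :=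
  match fuel with
  | 0 => out
  | fuel + 1 =>
    if i < out.length then
      if out.getD i ' ' = ' ' then
        pvLoopA (out.take (i + 1) ++ out.drop (pvFindJ out (out.length - i) i)) fuel (i + 1)
      else
        pvLoopA out fuel (i + 1)
    else out

def fix_term (term : String) : String :=
  -- translate(maketrans('', '', punctuation)) = delete punctuation chars (exact)
  let out := ((PySem.Str.lower term).toList.filter (fun c => !(pvPunct.contains c)))
  String.ofList (pvLoopA out out.length 0)

-- ===== PORT B =====
def pvBStep (st : List Char × Bool) (ch : Char) : List Char × Bool :=
  if pvPunct.contains ch then st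
  else if ch = ' ' then
    ((if st.2 then st.1 else st.1 ++ [' ']), true)
  else (st.1 ++ [ch], false)

def fix_term_alt (term : String) : String :=
  String.ofList (((PySem.Str.lower term).toList.foldl pvBStep ([], false)).1)

-- ===== PRECONDITION & SPEC =====
def Spec_fix_term (term : String) (out : String) : Prop := out = fix_term_alt term
instance (term : String) (out : String) : Decidable (Spec_fix_term term out) := by unfold Spec_fix_term; infer_instance

-- ===== CLAIM (what is proved, stated in full; the proofs are below) =====
def Claim_equal_fix_term : Prop := ∀ (term : String), Dom_fix_term term → Spec_fix_term term (fix_term term)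

-- ===== LEMMAS AND PROOFS =====

-- space-collapsing state machine on an already punctuation-free list
def pvSq : List Char → Bool → List Char
  | [], _ => []
  | c :: cs, p =>
    if c = ' ' then (if p then pvSq cs true else ' ' :: pvSq cs true)
    else c :: pvSq cs false

theorem pvSq_true (l : List Char) :
    pvSq l true = pvSq (l.dropWhile (· = ' ')) false := by
  induction l with
  | nil => simp [pvSq]
  | cons c cs ih =>
    by_cases hc : c = ' '
    · simp [pvSq, hc, ih]
    · simp [pvSq, hc]

theorem pvFindJ_ge (out : List Char) (fuel j : Nat) : j ≤ pvFindJ out fuel j := by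
  induction fuel generalizing j with
  | zero => simp [pvFindJ]
  | succ fuel ih =>
    rw [pvFindJ]
    split
    · have := ih (j + 1); omega
    · exact Nat.le_refl j

theorem pvFindJ_le (out : List Char) (fuel j : Nat) (h : j ≤ out.length) :
    pvFindJ out fuel j ≤ out.length := by
  induction fuel generalizing j with
  | zero => simpa [pvFindJ] using h
  | succ fuel ih =>
    rw [pvFindJ]
    split
    · exact ih (j + 1) (by omega)
    · exact h

theorem pvFindJ_gt (out : List Char) (fuel i : Nat) (hf : 0 < fuel)
    (h : i < out.length) (hs : out.getD i ' ' = ' ') :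
    i + 1 ≤ pvFindJ out fuel i := by
  obtain ⟨fuel', rfl⟩ : ∃ f, fuel = f + 1 := ⟨fuel - 1, by omega⟩
  rw [pvFindJ, if_pos ⟨h, hs⟩]
  exact pvFindJ_ge out fuel' (i + 1)

theorem pvDrop_findJ (out : List Char) (fuel j : Nat) (hf : out.length - j ≤ fuel) :
    out.drop (pvFindJ out fuel j) = (out.drop j).dropWhile (· = ' ') := by
  induction fuel generalizing j with
  | zero =>
    have : out.length ≤ j := by omega
    rw [pvFindJ, List.drop_eq_nil_of_le this]
    simp
  | succ fuel ih =>
    rw [pvFindJ]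
    split
    case isTrue h =>
      have hg : out.getD j ' ' = out[j]'h.1 := List.getD_eq_getElem out ' ' h.1
      have hd : out.drop j = out[j]'h.1 :: out.drop (j + 1) :=
        List.drop_eq_getElem_cons h.1
      have h2 : out[j]'h.1 = ' ' := by rw [← hg]; exact h.2
      rw [ih (j + 1) (by omega), hd, List.dropWhile_cons]
      simp [h2]
    case isFalse h =>
      by_cases hj : j < out.length
      · have hg : out.getD j ' ' = out[j]'hj := List.getD_eq_getElem out ' ' hj
        have hs : ¬ out[j]'hj = ' ' := by rw [← hg]; exact fun hs => h ⟨hj, hs⟩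
        have hd : out.drop j = out[j]'hj :: out.drop (j + 1) :=
          List.drop_eq_getElem_cons hj
        rw [hd, List.dropWhile_cons]
        simp [hs]
      · rw [List.drop_eq_nil_of_le (by omega)]
        simp

theorem pvLoopA_eq (fuel : Nat) (out : List Char) (i : Nat) (h : i ≤ out.length)
    (hf : out.length - i ≤ fuel) :
    pvLoopA out fuel i = out.take i ++ pvSq (out.drop i) false := by
  induction fuel generalizing out i with
  | zero =>
    have hi : i = out.length := by omega
    subst hi
    simp [pvLoopA, pvSq]
  | succ fuel ih =>
    rw [pvLoopA]
    by_cases hi : i < out.length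
    · rw [if_pos hi]
      have hg : out.getD i ' ' = out[i]'hi := List.getD_eq_getElem out ' ' hi
      have hd : out.drop i = out[i]'hi :: out.drop (i + 1) :=
        List.drop_eq_getElem_cons hi
      have ht : out.take (i + 1) = out.take i ++ [out[i]'hi] := by
        rw [List.take_add_one]
        simp [List.getElem?_eq_getElem hi]
      by_cases hs : out.getD i ' ' = ' '
      · rw [if_pos hs]
        rw [hg] at hs
        have hj1 := pvFindJ_gt out (out.length - i) i (by omega) hi
          (by rw [List.getD_eq_getElem out ' ' hi]; exact hs)
        have hj2 := pvFindJ_le out (out.length - i) i (Nat.le_of_lt hi)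
        have hlen : (out.take (i + 1)).length = i + 1 := by
          simp [List.length_take]; omega
        rw [ih (out.take (i + 1) ++ out.drop (pvFindJ out (out.length - i) i)) (i + 1)
          (by simp [List.length_append, hlen])
          (by simp only [List.length_append, List.length_drop, hlen]; omega)]
        rw [List.take_append_of_le_length (by omega), List.take_take, min_self]
        rw [List.drop_append_of_le_length (by omega),
          List.drop_eq_nil_of_le (le_of_eq hlen), List.nil_append]
        rw [pvDrop_findJ out (out.length - i) i (by omega), ht, hd,
          List.dropWhile_cons, List.append_assoc]
        simp only [hs, decide_true, if_true, List.cons_append, List.nil_append]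
        congr 1
        simp [pvSq, pvSq_true]
      · rw [if_neg hs]
        rw [hg] at hs
        rw [ih out (i + 1) hi (by omega), hd, ht, List.append_assoc]
        simp only [List.cons_append, List.nil_append]
        congr 1
        simp [pvSq, hs]
    · rw [if_neg hi]
      have : i = out.length := by omega
      subst this
      simp [pvSq]

theorem pvBFold (l : List Char) (res : List Char) (p : Bool) :
    (l.foldl pvBStep (res, p)).1 =
      res ++ pvSq (l.filter (fun c => !(pvPunct.contains c))) p := by
  induction l generalizing res p with
  | nil => simp [pvSq]
  | cons c cs ih =>
    simp only [List.foldl_cons, List.filter_cons]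
    by_cases hc : c ∈ pvPunct
    · simp [pvBStep, hc, ih]
    · by_cases hs : c = ' '
      · have hp : ¬ (' ' ∈ pvPunct) := by decide
        subst hs
        cases p <;> simp [pvBStep, hp, ih, pvSq]
      · simp [pvBStep, hc, hs, ih, pvSq]

-- ===== VERDICT (by name: the statement is the Claim_ definition above) =====
theorem fix_term_spec : Claim_equal_fix_term := by
  intro term _
  unfold Spec_fix_term fix_term fix_term_alt
  rw [pvBFold]
  show String.ofList (pvLoopA (List.filter (fun c => !pvPunct.contains c) (PySem.Str.lower term).toList)
    (List.filter (fun c => !pvPunct.contains c) (PySem.Str.lower term).toList).length 0) = _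
  rw [pvLoopA_eq _ _ 0 (Nat.zero_le _) (by omega)]
  simp
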